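-- pv_equiv track=rewrite | github.com/perezjoseph/Gestion-inmobiliaria | scripts/quality_webhook/fixers.py | build_invariant_section
-- ===== SOURCE A (Python) =====
-- _DOMAIN_INVARIANTS = {
--     "contratos": [
--         "No overlapping active contracts: a propiedad cannot have two contratos "
--         "with estado='activo' whose date ranges overlap.",
--         "Contrato integrity: every contrato references exactly one propiedad and one inquilino.",
--         "Propiedad estado cascade: creating an active contrato sets propiedad.estado to 'ocupada'. "
--         "Cancelling the last active contrato sets it back to 'disponible'.",
--     ],
--     "inquilinos": [
--         "Cedula uniqueness: inquilino.cedula is unique across the system.",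
--     ],
--     "usuarios": [
--         "Email uniqueness: usuario.email is unique across the system.",
--     ],
--     "pagos": [
--         "Payment lateness: a pago is late when fecha_pago > fecha_vencimiento (paid after due) "
--         "OR fecha_pago IS NULL AND fecha_vencimiento < today (unpaid past due).",
--         "A pago always belongs to a contrato.",
--     ],
--     "gastos": [
--         "Gasto scope: a gasto belongs to a propiedad and optionally to a unidad. "
--         "If unidad_id is set, it must belong to the referenced propiedad.",
--     ],
--     "propiedades": [
--         "Currency consistency: every monetary entity carries its own moneda field (DOP or USD).",
--         "Propiedad estado cascade: creating an active contrato sets estado to 'ocupada'.",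
--     ],
-- }
--
-- def _get_domain_from_files(files: list[str]) -> set[str]:
--     domains = set()
--     for f in files:
--         lower = f.lower()
--         for domain in _DOMAIN_INVARIANTS:
--             if domain in lower:
--                 domains.add(domain)
--     return domains
--
-- def build_invariant_section(affected_files: list[str]) -> str:
--     domains = _get_domain_from_files(affected_files)
--     if not domains:
--         return ""
--     lines = ["BUSINESS INVARIANTS (these MUST hold — violations are bugs):"]
--     for domain in sorted(domains):
--         for inv in _DOMAIN_INVARIANTS[domain]:
--             lines.append(f"  - {inv}")
--     return "\n".join(lines) + "\n"
-- ===== SOURCE B (Python) =====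
-- # Single table-driven pass over the (alphabetically listed) domain table:
-- # no intermediate domain set and no runtime sort.
-- _INVARIANTS_BY_DOMAIN = [  # domains listed in sorted (alphabetical) order
--     ("contratos", [
--         "No overlapping active contracts: a propiedad cannot have two contratos "
--         "with estado='activo' whose date ranges overlap.",
--         "Contrato integrity: every contrato references exactly one propiedad and one inquilino.",
--         "Propiedad estado cascade: creating an active contrato sets propiedad.estado to 'ocupada'. "
--         "Cancelling the last active contrato sets it back to 'disponible'.",
--     ]),
--     ("gastos", [
--         "Gasto scope: a gasto belongs to a propiedad and optionally to a unidad. "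
--         "If unidad_id is set, it must belong to the referenced propiedad.",
--     ]),
--     ("inquilinos", [
--         "Cedula uniqueness: inquilino.cedula is unique across the system.",
--     ]),
--     ("pagos", [
--         "Payment lateness: a pago is late when fecha_pago > fecha_vencimiento (paid after due) "
--         "OR fecha_pago IS NULL AND fecha_vencimiento < today (unpaid past due).",
--         "A pago always belongs to a contrato.",
--     ]),
--     ("propiedades", [
--         "Currency consistency: every monetary entity carries its own moneda field (DOP or USD).",
--         "Propiedad estado cascade: creating an active contrato sets estado to 'ocupada'.",
--     ]),
--     ("usuarios", [
--         "Email uniqueness: usuario.email is unique across the system.",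
--     ]),
-- ]
--
-- def build_invariant_section(affected_files: list) -> str:
--     lowered = [f.lower() for f in affected_files]
--     body = []
--     for domain, invariants in _INVARIANTS_BY_DOMAIN:
--         if any(domain in f for f in lowered):
--             body.extend("  - " + inv for inv in invariants)
--     if not body:
--         return ""
--     return "\n".join(["BUSINESS INVARIANTS (these MUST hold — violations are bugs):"] + body) + "\n"
-- ===== Notes on version B (the rewrite author's own statement) =====
-- stated objective: simpler
-- what changed: Replaces A's two-phase design (build a set of matched domains over files x keys, then re-sort it and look each domain up in the dict) with one table-driven pass over the fixed alphabetically-ordered domain table that tests each domain against the lowercased files and emits its invariant lines directly, eliminating the intermediate set and the runtime sort.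
import Mathlib
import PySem

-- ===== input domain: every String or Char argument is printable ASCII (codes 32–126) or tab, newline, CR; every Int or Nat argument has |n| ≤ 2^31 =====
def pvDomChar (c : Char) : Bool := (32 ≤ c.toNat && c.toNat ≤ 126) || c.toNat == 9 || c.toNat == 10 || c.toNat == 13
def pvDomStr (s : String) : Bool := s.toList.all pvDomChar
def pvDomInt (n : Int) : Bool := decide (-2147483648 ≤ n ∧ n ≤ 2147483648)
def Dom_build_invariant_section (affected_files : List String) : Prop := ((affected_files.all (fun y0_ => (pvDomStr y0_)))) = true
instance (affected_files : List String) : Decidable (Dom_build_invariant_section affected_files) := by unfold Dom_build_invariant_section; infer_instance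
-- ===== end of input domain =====

-- B replaces A's two-phase build-set/sort/lookup design with one table-driven pass
-- over the fixed alphabetically-ordered domain table (objective: simpler).

-- Python string concatenation a + b; exact (ports through List Char, not String.append)
def pvCat (a b : String) : String := String.ofList (a.toList ++ b.toList)

-- ===== PORT A =====
-- the module constant _DOMAIN_INVARIANTS, in its insertion order
def pvInvDict : PySem.Dict String (List String) := PySem.Dict.ofList [
    ("contratos", ["No overlapping active contracts: a propiedad cannot have two contratos with estado='activo' whose date ranges overlap.", "Contrato integrity: every contrato references exactly one propiedad and one inquilino.", "Propiedad estado cascade: creating an active contrato sets propiedad.estado to 'ocupada'. Cancelling the last active contrato sets it back to 'disponible'."]),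
    ("inquilinos", ["Cedula uniqueness: inquilino.cedula is unique across the system."]),
    ("usuarios", ["Email uniqueness: usuario.email is unique across the system."]),
    ("pagos", ["Payment lateness: a pago is late when fecha_pago > fecha_vencimiento (paid after due) OR fecha_pago IS NULL AND fecha_vencimiento < today (unpaid past due).", "A pago always belongs to a contrato."]),
    ("gastos", ["Gasto scope: a gasto belongs to a propiedad and optionally to a unidad. If unidad_id is set, it must belong to the referenced propiedad."]),
    ("propiedades", ["Currency consistency: every monetary entity carries its own moneda field (DOP or USD).", "Propiedad estado cascade: creating an active contrato sets estado to 'ocupada'."])]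

-- helper _get_domain_from_files
def pv_get_domain_from_files (files : List String) : PySem.Set String :=
  files.foldl (fun domains f =>
    let lower := PySem.Str.lower f
    (PySem.Dict.keys pvInvDict).foldl (fun domains domain =>
      if PySem.Str.isIn domain lower then PySem.Set.add domains domain else domains) domains)
    PySem.Set.empty

def build_invariant_section (affected_files : List String) : String :=
  let domains := pv_get_domain_from_files affected_files
  if domains = [] then ""
  else
    let lines := (PySem.List.sorted domains (fun x => x) false).foldl
      (fun lines domain =>
        (PySem.Dict.getD pvInvDict domain []).foldl (fun lines inv => lines ++ [pvCat "  - " inv]) lines)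
      ["BUSINESS INVARIANTS (these MUST hold — violations are bugs):"]
    pvCat (PySem.Str.join "\n" lines) "\n"

-- ===== PORT B =====
-- the module constant _INVARIANTS_BY_DOMAIN, domains in alphabetical order
def pvInvariantsByDomain : List (String × List String) := [
    ("contratos", ["No overlapping active contracts: a propiedad cannot have two contratos with estado='activo' whose date ranges overlap.", "Contrato integrity: every contrato references exactly one propiedad and one inquilino.", "Propiedad estado cascade: creating an active contrato sets propiedad.estado to 'ocupada'. Cancelling the last active contrato sets it back to 'disponible'."]),
    ("gastos", ["Gasto scope: a gasto belongs to a propiedad and optionally to a unidad. If unidad_id is set, it must belong to the referenced propiedad."]),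
    ("inquilinos", ["Cedula uniqueness: inquilino.cedula is unique across the system."]),
    ("pagos", ["Payment lateness: a pago is late when fecha_pago > fecha_vencimiento (paid after due) OR fecha_pago IS NULL AND fecha_vencimiento < today (unpaid past due).", "A pago always belongs to a contrato."]),
    ("propiedades", ["Currency consistency: every monetary entity carries its own moneda field (DOP or USD).", "Propiedad estado cascade: creating an active contrato sets estado to 'ocupada'."]),
    ("usuarios", ["Email uniqueness: usuario.email is unique across the system."])]

def build_invariant_section_alt (affected_files : List String) : String :=
  let lowered := affected_files.map PySem.Str.lower
  let body := pvInvariantsByDomain.foldl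
    (fun body p =>
      if lowered.any (fun f => PySem.Str.isIn p.1 f) then
        body ++ p.2.map (fun inv => pvCat "  - " inv)
      else body) []
  if body = [] then ""
  else pvCat (PySem.Str.join "\n" ("BUSINESS INVARIANTS (these MUST hold — violations are bugs):" :: body)) "\n"

-- ===== PRECONDITION & SPEC =====
def Spec_build_invariant_section (affected_files : List String) (out : String) : Prop := out = build_invariant_section_alt affected_files
instance (affected_files : List String) (out : String) : Decidable (Spec_build_invariant_section affected_files out) := by unfold Spec_build_invariant_section; infer_instance

-- ===== CLAIM (what is proved, stated in full; the proofs are below) =====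
def Claim_equal_build_invariant_section : Prop := ∀ (affected_files : List String), Dom_build_invariant_section affected_files → Spec_build_invariant_section affected_files (build_invariant_section affected_files)

-- ===== LEMMAS AND PROOFS =====

-- the guard "some affected file (lowercased) contains d"
def pvG (files : List String) (d : String) : Bool :=
  files.any (fun f => PySem.Str.isIn d (PySem.Str.lower f))

-- the shared emitted body: invariant lines of the matched domains, in table order
def pvBody (files : List String) : List String :=
  (pvInvariantsByDomain.filter (fun p => pvG files p.1)).flatMap
    (fun p => p.2.map (fun inv => pvCat "  - " inv))

theorem pv_mem_inner (q : String → Bool) (ks : List String) (acc : PySem.Set String) (d : String) :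
    d ∈ ks.foldl (fun s dom => if q dom then PySem.Set.add s dom else s) acc ↔
      d ∈ acc ∨ (d ∈ ks ∧ q d = true) := by
  induction ks generalizing acc with
  | nil => simp
  | cons k ks ih =>
    simp only [List.foldl_cons, ih, List.mem_cons]
    by_cases hk : d = k
    · subst hk
      by_cases h : q d = true <;> simp [h, PySem.Set.mem_add]
    · by_cases h : q k = true <;> simp [h, PySem.Set.mem_add, hk]

theorem pv_mem_outer (files : List String) (acc : PySem.Set String) (d : String) :
    d ∈ files.foldl (fun domains f =>
        let lower := PySem.Str.lower f
        (PySem.Dict.keys pvInvDict).foldl (fun domains domain =>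
          if PySem.Str.isIn domain lower then PySem.Set.add domains domain else domains) domains) acc ↔
      d ∈ acc ∨ (d ∈ PySem.Dict.keys pvInvDict ∧ pvG files d = true) := by
  induction files generalizing acc with
  | nil => simp [pvG]
  | cons f fs ih =>
    simp only [List.foldl_cons, ih, pv_mem_inner, pvG, List.any_cons]
    simp only [Bool.or_eq_true]
    tauto

theorem pv_mem_domains (files : List String) (d : String) :
    d ∈ pv_get_domain_from_files files ↔
      d ∈ PySem.Dict.keys pvInvDict ∧ pvG files d = true := by
  unfold pv_get_domain_from_files
  rw [pv_mem_outer]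
  simp [PySem.Set.empty]

theorem pv_nodup_inner (q : String → Bool) (ks : List String) (acc : PySem.Set String)
    (h : acc.Nodup) :
    (ks.foldl (fun s dom => if q dom then PySem.Set.add s dom else s) acc).Nodup := by
  induction ks generalizing acc with
  | nil => simpa
  | cons k ks ih =>
    simp only [List.foldl_cons]
    apply ih
    split
    · exact PySem.Set.nodup_add acc k h
    · exact h

theorem pv_nodup_domains (files : List String) : (pv_get_domain_from_files files).Nodup := by
  unfold pv_get_domain_from_files
  generalize hacc : (PySem.Set.empty : PySem.Set String) = acc
  have h : acc.Nodup := by subst hacc; simp [PySem.Set.empty]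
  clear hacc
  induction files generalizing acc with
  | nil => simpa
  | cons f fs ih =>
    simp only [List.foldl_cons]
    exact ih _ (pv_nodup_inner _ _ _ h)

theorem pv_keys : PySem.Dict.keys pvInvDict =
    ["contratos", "inquilinos", "usuarios", "pagos", "gastos", "propiedades"] := by decide

theorem pv_fsts : pvInvariantsByDomain.map Prod.fst =
    ["contratos", "gastos", "inquilinos", "pagos", "propiedades", "usuarios"] := by decide

-- sorted(domains) is exactly the alphabetical key table filtered by the guard
theorem pv_sorted_domains (files : List String) :
    PySem.List.sorted (pv_get_domain_from_files files) (fun x => x) false =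
      (pvInvariantsByDomain.map Prod.fst).filter (fun d => pvG files d) := by
  apply PySem.List.sorted_eq_of_perm_of_pairwise_lt
  · rw [List.perm_ext_iff_of_nodup]
    · intro d
      rw [pv_mem_domains, pv_keys]
      simp only [List.mem_filter, pv_fsts]
      constructor
      · rintro ⟨hm, hg⟩
        refine ⟨?_, hg⟩
        revert hm; simp; tauto
      · rintro ⟨hm, hg⟩
        refine ⟨?_, hg⟩
        revert hm; simp; tauto
    · apply List.Nodup.filter
      rw [pv_fsts]; decide
    · exact pv_nodup_domains files
  · apply List.Pairwise.filter
    rw [pv_fsts]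
    norm_num [List.pairwise_cons]
    refine ⟨?_, ?_, ?_, ?_, ?_⟩ <;> decide

-- every table entry's invariant list is its dict lookup, and is nonempty
set_option maxRecDepth 8192 in
theorem pv_table_getD : ∀ p ∈ pvInvariantsByDomain,
    PySem.Dict.getD pvInvDict p.1 [] = p.2 ∧ p.2 ≠ [] := by decide

theorem pv_foldl_append_if_list {α β : Type} (p : α → Bool) (F : α → List β)
    (l : List α) (acc : List β) :
    l.foldl (fun acc x => if p x then acc ++ F x else acc) acc =
      acc ++ (l.filter p).flatMap F := by
  induction l generalizing acc with
  | nil => simp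
  | cons x xs ih =>
    by_cases h : p x = true <;> simp [h, ih]

theorem pv_filter_map_fst (files : List String) :
    (pvInvariantsByDomain.map Prod.fst).filter (fun d => pvG files d) =
      (pvInvariantsByDomain.filter (fun p => pvG files p.1)).map Prod.fst := by
  rw [List.filter_map]
  rfl

-- A's accumulated lines = header :: shared body
theorem pv_lines_eq (files : List String) :
    ((PySem.List.sorted (pv_get_domain_from_files files) (fun x => x) false).foldl
      (fun lines domain =>
        (PySem.Dict.getD pvInvDict domain []).foldl (fun lines inv => lines ++ [pvCat "  - " inv]) lines)
      ["BUSINESS INVARIANTS (these MUST hold — violations are bugs):"]) =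
      "BUSINESS INVARIANTS (these MUST hold — violations are bugs):" :: pvBody files := by
  rw [pv_sorted_domains, pv_filter_map_fst]
  simp only [PySem.List.foldl_append_singleton_eq_map]
  rw [List.foldl_map, PySem.List.foldl_append_eq_flatMap, List.singleton_append]
  unfold pvBody
  congr 1
  apply List.flatMap_congr
  intro p hp
  rw [(pv_table_getD p (List.mem_of_mem_filter hp)).1]

-- B's accumulated body = shared body
theorem pv_body_eq (files : List String) :
    (pvInvariantsByDomain.foldl
      (fun body p =>
        if (files.map PySem.Str.lower).any (fun f => PySem.Str.isIn p.1 f) then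
          body ++ p.2.map (fun inv => pvCat "  - " inv)
        else body) []) = pvBody files := by
  have hg : ∀ p : String × List String,
      ((files.map PySem.Str.lower).any (fun f => PySem.Str.isIn p.1 f)) = pvG files p.1 := by
    intro p; unfold pvG; rw [List.any_map]; rfl
  simp only [hg]
  rw [pv_foldl_append_if_list]
  simp [pvBody]

theorem pv_empty_iff (files : List String) :
    pv_get_domain_from_files files = [] ↔ pvBody files = [] := by
  rw [← PySem.List.sorted_eq_nil_iff (pv_get_domain_from_files files) (fun x => x) false]
  rw [pv_sorted_domains, pv_filter_map_fst]
  unfold pvBody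
  cases h : pvInvariantsByDomain.filter (fun p => pvG files p.1) with
  | nil => simp
  | cons p ps =>
    simp only [List.map_cons, List.flatMap_cons]
    have hne : p.2 ≠ [] := by
      have hp : p ∈ pvInvariantsByDomain := List.mem_of_mem_filter (h ▸ List.mem_cons_self ..)
      exact (pv_table_getD p hp).2
    constructor <;> intro hc
    · exact absurd hc (by simp)
    · rw [List.append_eq_nil_iff] at hc
      exact absurd (List.map_eq_nil_iff.mp hc.1) hne

-- ===== VERDICT (by name: the statement is the Claim_ definition above) =====
theorem build_invariant_section_spec : Claim_equal_build_invariant_section := by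
  intro files _
  unfold Spec_build_invariant_section build_invariant_section build_invariant_section_alt
  simp only [pv_body_eq, pv_lines_eq]
  by_cases h : pv_get_domain_from_files files = []
  · rw [if_pos h, if_pos ((pv_empty_iff files).mp h), eq_comm]
  · rw [if_neg h, if_neg (fun hc => h ((pv_empty_iff files).mpr hc))]
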